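-- pv_equiv track=rewrite | github.com/milarien/Aurora-PEF | demos/epistemic_legitimacy_pronoun_binding/demo_epistemic_gate.py | supported_bindings_from_stream
-- ===== SOURCE A (Python) =====
-- from dataclasses import dataclass, asdict
-- from typing import List, Dict, Optional, Tuple
--
-- @dataclass
-- class PEFState:
--     """Tiny 'PEF-like' context store for one phenomenon: whether each sister is salient in prior context."""
--     emma_sister_mentioned: bool = False
--     lucy_sister_mentioned: bool = False
--
-- def normalize(s: str) -> str:
--     return s.replace("’", "'").strip()
--
-- def update_pef(state: PEFState, sentence: str) -> None:
--     t = normalize(sentence).lower()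
--     if "emma's sister" in t:
--         state.emma_sister_mentioned = True
--     if "lucy's sister" in t:
--         state.lucy_sister_mentioned = True
--
-- def supported_bindings_from_stream(stream: List[str]) -> List[str]:
--     """Return list of bindings supported by prefix evidence (excluding the ambiguous sentence)."""
--     pef = PEFState()
--     for s in stream[:-1]:
--         update_pef(pef, s)
--
--     supported: List[str] = []
--     if pef.emma_sister_mentioned:
--         supported.append("Emma's sister")
--     if pef.lucy_sister_mentioned:
--         supported.append("Lucy's sister")
--     return supported
-- ===== SOURCE B (Python) =====
-- _TABLE = [("emma's sister", "Emma's sister"), ("lucy's sister", "Lucy's sister")]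
--
-- def supported_bindings_from_stream(stream):
--     # Aggregate the evidence prefix into ONE newline-joined blob, then do a single
--     # substring test per keyword on the blob (no per-sentence scanning).
--     # '\n' as separator: the keywords contain no newline, so no match can span
--     # a sentence boundary, preserving per-sentence semantics.
--     blob = "\n".join(s.replace("\u2019", "'").strip().lower() for s in stream[:-1])
--     return [label for kw, label in _TABLE if kw in blob]
-- ===== Notes on version B (the rewrite author's own statement) =====
-- stated objective: alternative
-- what changed: Replaces the incremental per-sentence flag-mutation loop (PEFState + update_pef per sentence) by a staged aggregation: normalize and join the whole prefix into one newline-separated blob, then emit labels from a fixed keyword table by a single substring test per keyword on the blob; correctness rests on the keywords containing no newline, so no match spans a sentence boundary.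
import Mathlib
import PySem

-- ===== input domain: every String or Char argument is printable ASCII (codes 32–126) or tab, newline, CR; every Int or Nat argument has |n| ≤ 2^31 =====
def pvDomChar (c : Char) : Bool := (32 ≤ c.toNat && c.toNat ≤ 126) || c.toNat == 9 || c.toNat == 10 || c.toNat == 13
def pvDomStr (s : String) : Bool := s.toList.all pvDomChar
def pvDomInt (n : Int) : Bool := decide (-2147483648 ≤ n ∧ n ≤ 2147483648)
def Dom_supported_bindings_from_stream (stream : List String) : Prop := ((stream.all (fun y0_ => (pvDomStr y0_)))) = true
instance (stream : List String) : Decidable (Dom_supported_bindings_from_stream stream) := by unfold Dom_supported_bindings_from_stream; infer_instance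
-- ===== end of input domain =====

-- B replaces the per-sentence flag-mutation loop by aggregating the normalized prefix
-- into one newline-joined blob and testing each table keyword once against the blob
-- (objective: alternative decomposition; keywords contain no newline, so no match spans a boundary).

-- ===== PORT A =====
-- normalize(s)
def pvNormalize (s : String) : String := PySem.Str.strip (PySem.Str.replace s "’" "'")

-- update_pef: the PEFState (emma_sister_mentioned, lucy_sister_mentioned) as a Bool pair
def pvUpdatePef (state : Bool × Bool) (sentence : String) : Bool × Bool :=
  let t := PySem.Str.lower (pvNormalize sentence)
  let e := if PySem.Str.isIn "emma's sister" t then true else state.1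
  let l := if PySem.Str.isIn "lucy's sister" t then true else state.2
  (e, l)

def supported_bindings_from_stream (stream : List String) : List String :=
  let pef := (PySem.List.slice stream none (some (-1))).foldl pvUpdatePef (false, false)
  let supported : List String := []
  let supported := if pef.1 then supported ++ ["Emma's sister"] else supported
  let supported := if pef.2 then supported ++ ["Lucy's sister"] else supported
  supported

-- ===== PORT B =====
def pvTable : List (String × String) :=
  [("emma's sister", "Emma's sister"), ("lucy's sister", "Lucy's sister")]

def supported_bindings_from_stream_alt (stream : List String) : List String :=
  let blob := PySem.Str.join "\n" ((PySem.List.slice stream none (some (-1))).map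
    (fun s => PySem.Str.lower (PySem.Str.strip (PySem.Str.replace s "’" "'"))))
  (pvTable.filter (fun kl => PySem.Str.isIn kl.1 blob)).map (fun kl => kl.2)

-- ===== PRECONDITION & SPEC =====
def Spec_supported_bindings_from_stream (stream : List String) (out : List String) : Prop := out = supported_bindings_from_stream_alt stream
instance (stream : List String) (out : List String) : Decidable (Spec_supported_bindings_from_stream stream out) := by unfold Spec_supported_bindings_from_stream; infer_instance

-- ===== CLAIM (what is proved, stated in full; the proofs are below) =====
def Claim_equal_supported_bindings_from_stream : Prop := ∀ (stream : List String), Dom_supported_bindings_from_stream stream → Spec_supported_bindings_from_stream stream (supported_bindings_from_stream stream)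

-- ===== LEMMAS AND PROOFS =====

-- a flag-setting fold over two abstract predicates computes the two `any`s
theorem pvFoldl_flags (pE pL : String → Bool) (xs : List String) (e l : Bool) :
    xs.foldl (fun st s => (if pE s then true else st.1, if pL s then true else st.2)) (e, l) =
      (e || xs.any pE, l || xs.any pL) := by
  induction xs generalizing e l with
  | nil => simp
  | cons x xs ih =>
    simp only [List.foldl_cons, List.any_cons, ih]
    cases h1 : pE x <;> cases h2 : pL x <;> simp

theorem pvUpdatePef_eq :
    pvUpdatePef = fun st s =>
      (if (fun s => PySem.Str.isIn "emma's sister" (PySem.Str.lower (PySem.Str.strip (PySem.Str.replace s "’" "'")))) s then true else st.1,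
       if (fun s => PySem.Str.isIn "lucy's sister" (PySem.Str.lower (PySem.Str.strip (PySem.Str.replace s "’" "'")))) s then true else st.2) := rfl

-- a prefix of l₁ ++ '\n'::l₂ that avoids '\n' is a prefix of l₁
theorem pvPrefix_split (kw l₁ l₂ : List Char) (hnl : '\n' ∉ kw)
    (h : kw <+: l₁ ++ '\n' :: l₂) : kw <+: l₁ := by
  by_cases hlen : kw.length ≤ l₁.length
  · rw [List.prefix_iff_eq_take] at h ⊢
    rwa [List.take_append_of_le_length hlen] at h
  · exfalso
    rw [Nat.not_le] at hlen
    obtain ⟨t, ht⟩ := h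
    have h1 : (kw ++ t)[l₁.length]? = some '\n' := by
      rw [ht, List.getElem?_append_right (Nat.le_refl _)]
      simp
    rw [List.getElem?_append_left hlen] at h1
    exact hnl (List.mem_of_getElem? h1)

-- an infix of l₁ ++ '\n'::l₂ that avoids '\n' is an infix of l₁ or of l₂
theorem pvInfix_split (kw l₁ l₂ : List Char) (hnl : '\n' ∉ kw)
    (h : kw <:+: l₁ ++ '\n' :: l₂) : kw <:+: l₁ ∨ kw <:+: l₂ := by
  induction l₁ with
  | nil =>
    rw [List.nil_append, List.infix_cons_iff] at h
    rcases h with h | h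
    · cases kw with
      | nil => exact Or.inl List.nil_infix
      | cons c kw' =>
        exfalso
        obtain ⟨t, ht⟩ := h
        simp only [List.cons_append] at ht
        injection ht with h1 _
        exact hnl (h1 ▸ List.mem_cons_self)
    · exact Or.inr h
  | cons a l₁ ih =>
    rw [List.cons_append, List.infix_cons_iff] at h
    rcases h with h | h
    · exact Or.inl ((pvPrefix_split kw (a :: l₁) l₂ hnl h).isInfix)
    · rcases ih h with h' | h'
      · exact Or.inl (List.infix_cons h')
      · exact Or.inr h'

-- a nonempty newline-free pattern is an infix of the '\n'-join iff it is an infix of some part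
theorem pvInfix_join (kw : List Char) (hnl : '\n' ∉ kw) (hne : kw ≠ []) :
    ∀ (parts : List (List Char)),
      (kw <:+: PySem.Chars.join ['\n'] parts ↔ ∃ p ∈ parts, kw <:+: p) := by
  intro parts
  induction parts with
  | nil =>
    rw [PySem.Chars.join_nil]
    simp [List.infix_nil, hne]
  | cons p rest ih =>
    cases rest with
    | nil =>
      rw [PySem.Chars.join_singleton]
      simp
    | cons q rest' =>
      rw [PySem.Chars.join_cons_cons]
      constructor
      · intro h
        rw [List.append_assoc, List.singleton_append] at h
        rcases pvInfix_split kw p _ hnl h with h' | h'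
        · exact ⟨p, List.mem_cons_self, h'⟩
        · obtain ⟨r, hr, hr'⟩ := ih.mp h'
          exact ⟨r, List.mem_cons_of_mem _ hr, hr'⟩
      · rintro ⟨r, hr, hr'⟩
        rcases List.mem_cons.mp hr with rfl | hr
        · refine hr'.trans ?_
          rw [List.append_assoc]
          exact (List.prefix_append _ _).isInfix
        · exact (ih.mpr ⟨r, hr, hr'⟩).trans ((List.suffix_append _ _).isInfix)

-- the blob membership test equals the per-sentence `any`
theorem pvIsIn_blob (kw : String) (hnl : '\n' ∉ kw.toList) (hne : kw.toList ≠ [])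
    (f : String → String) (xs : List String) :
    PySem.Str.isIn kw (PySem.Str.join "\n" (xs.map f)) = xs.any (fun s => PySem.Str.isIn kw (f s)) := by
  rw [Bool.eq_iff_iff]
  rw [PySem.Str.isIn_iff_infix, PySem.Str.toList_join]
  have : ("\n" : String).toList = ['\n'] := rfl
  rw [this, pvInfix_join _ hnl hne]
  simp only [List.map_map, List.any_eq_true, List.mem_map, Function.comp]
  constructor
  · rintro ⟨p, ⟨s, hs, rfl⟩, hp⟩
    exact ⟨s, hs, (PySem.Str.isIn_iff_infix _ _).mpr hp⟩
  · rintro ⟨s, hs, h⟩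
    exact ⟨(f s).toList, ⟨s, hs, rfl⟩, (PySem.Str.isIn_iff_infix _ _).mp h⟩

-- ===== VERDICT (by name: the statement is the Claim_ definition above) =====
theorem supported_bindings_from_stream_spec : Claim_equal_supported_bindings_from_stream := by
  intro stream _
  unfold Spec_supported_bindings_from_stream
  simp only [supported_bindings_from_stream, supported_bindings_from_stream_alt, pvTable]
  rw [pvUpdatePef_eq, pvFoldl_flags]
  simp only [List.filter_cons, List.filter_nil, Bool.false_or]
  rw [pvIsIn_blob "emma's sister" (by decide) (by decide),
      pvIsIn_blob "lucy's sister" (by decide) (by decide)]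
  cases hE : (PySem.List.slice stream none (some (-1))).any
      (fun s => PySem.Str.isIn "emma's sister" (PySem.Str.lower (PySem.Str.strip (PySem.Str.replace s "’" "'")))) <;>
  cases hL : (PySem.List.slice stream none (some (-1))).any
      (fun s => PySem.Str.isIn "lucy's sister" (PySem.Str.lower (PySem.Str.strip (PySem.Str.replace s "’" "'")))) <;>
    simp only [if_true, if_false, List.map_cons, List.map_nil, List.nil_append,
      Bool.false_eq_true, List.singleton_append]
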